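-- pv_equiv track=rewrite | github.com/scout719/adventOfCode | 2015/day5.py | day5_solve2
-- ===== SOURCE A (Python) =====
-- def day5_solve2(s_list):
--     l = []
--     for s in s_list:
--         count = 0
--
--         for i in range(len(s) - 1):
--             sub_str = s[i] + s[i + 1]
--             for j in range(i + 2, len(s) - 1):
--                 sub_str2 = s[j] + s[j + 1]
--                 if sub_str == sub_str2:
--                     count += 1
--         valid = count >= 1
--
--         count = 0
--         i = 0
--         while i < len(s) - 2:
--             if s[i] == s[i + 2]:
--                 count += 1
--                 i += 2
--             i += 1
--         valid &= count >= 1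
--         if valid:
--             l.append(s)
--     return l
-- ===== SOURCE B (Python) =====
-- def day5_solve2(s_list):
--     def nice(s):
--         # non-overlapping repeated pair: hash each pair to its first index
--         first = {}
--         pair_ok = False
--         for i in range(len(s) - 1):
--             p = (s[i], s[i + 1])
--             if p in first:
--                 if i - first[p] >= 2:
--                     pair_ok = True
--                     break
--             else:
--                 first[p] = i
--         if not pair_ok:
--             return False
--         # a letter repeating with exactly one letter between
--         return any(s[i] == s[i + 2] for i in range(len(s) - 2))
--     return [s for s in s_list if nice(s)]
-- ===== Notes on version B (the rewrite author's own statement) =====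
-- stated objective: faster
-- what changed: Replaces the quadratic scan of all later pairs by a dict mapping each letter pair to its first index (non-overlapping repeat found in one pass with early exit), and the skipping while-loop by a direct any() over positions; nice strings are collected by a comprehension.
import Mathlib
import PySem

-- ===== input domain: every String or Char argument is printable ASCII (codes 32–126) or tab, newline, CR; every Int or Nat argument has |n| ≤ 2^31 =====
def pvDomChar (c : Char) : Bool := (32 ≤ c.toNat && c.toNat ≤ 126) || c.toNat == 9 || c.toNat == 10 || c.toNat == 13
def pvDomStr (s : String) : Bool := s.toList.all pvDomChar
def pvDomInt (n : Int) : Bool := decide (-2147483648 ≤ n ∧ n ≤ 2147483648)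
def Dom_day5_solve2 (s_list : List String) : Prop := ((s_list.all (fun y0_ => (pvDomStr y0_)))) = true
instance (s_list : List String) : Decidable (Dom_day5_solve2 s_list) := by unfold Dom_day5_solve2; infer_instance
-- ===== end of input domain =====

-- B replaces A's quadratic pair scan by a first-index dict and the skipping while-loop
-- by a direct any(); measured asymptotically faster (O(m·n) vs O(m·n²)).


-- ===== PORT A =====
-- the pair (s[i], s[i+1]); indices used by both Pythons are always in range, so getD's
-- default is never read
def pairAt (cs : List Char) (i : Nat) : Char × Char := (cs.getD i ' ', cs.getD (i+1) ' ')

-- A's while loop: if s[i] == s[i+2] then count += 1; i += 2; then i += 1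
def aTripleLoop (cs : List Char) (nm2 : Nat) (i : Nat) (count : Int) : Int :=
  if _h : i < nm2 then
    if cs.getD i ' ' = cs.getD (i+2) ' ' then aTripleLoop cs nm2 (i+3) (count+1)
    else aTripleLoop cs nm2 (i+1) count
  else count
termination_by nm2 - i
decreasing_by all_goals omega

-- the body of A's outer loop for one string s (range(k) over nonnegative bounds is
-- ported as List.range / List.range', exact here)
def aNice (s : String) : Bool :=
  let cs := s.toList
  let n := cs.length
  let count : Int := (List.range (n-1)).foldl (fun c i =>
      (List.range' (i+2) (n-1-(i+2))).foldl
        (fun c2 j => if pairAt cs i = pairAt cs j then c2+1 else c2) c) 0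
  let valid := decide (1 ≤ count)
  (valid && decide (1 ≤ aTripleLoop cs (n-2) 0 0))

def day5_solve2 (s_list : List String) : List String :=
  s_list.foldl (fun l s => if aNice s then l ++ [s] else l) []

-- ===== PORT B =====
-- B's for-loop over i with dict `first` (pair -> first index) and break on success
def altPairLoop (cs : List Char) (first : PySem.Dict (Char × Char) Nat) :
    List Nat → Bool
  | [] => false
  | i :: rest =>
    match first.get? (pairAt cs i) with
    | some k => if k + 2 ≤ i then true else altPairLoop cs first rest
    | none => altPairLoop cs (first.insert (pairAt cs i) i) rest

def altNice (s : String) : Bool :=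
  let cs := s.toList
  let n := cs.length
  if altPairLoop cs PySem.Dict.empty (List.range (n-1)) then
    (List.range (n-2)).any (fun i => cs.getD i ' ' == cs.getD (i+2) ' ')
  else false

def day5_solve2_alt (s_list : List String) : List String :=
  s_list.filter altNice

-- ===== PRECONDITION & SPEC =====
def Spec_day5_solve2 (s_list : List String) (out : List String) : Prop := out = day5_solve2_alt s_list
instance (s_list : List String) (out : List String) : Decidable (Spec_day5_solve2 s_list out) := by unfold Spec_day5_solve2; infer_instance

-- ===== CLAIM (what is proved, stated in full; the proofs are below) =====
def Claim_equal_day5_solve2 : Prop := ∀ (s_list : List String), Dom_day5_solve2 s_list → Spec_day5_solve2 s_list (day5_solve2 s_list)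

-- ===== LEMMAS AND PROOFS =====

-- `first` holds exactly the first occurrence index of each pair among indices < a
def firstInv (cs : List Char) (a : Nat) (d : PySem.Dict (Char × Char) Nat) : Prop :=
  ∀ p v, d.get? p = some v ↔ (v < a ∧ pairAt cs v = p ∧ ∀ u, u < v → pairAt cs u ≠ p)

theorem firstInv_empty (cs : List Char) : firstInv cs 0 PySem.Dict.empty := by
  intro p v
  simp [PySem.Dict.get?_empty]

theorem altPairLoop_spec (cs : List Char) :
    ∀ (k a : Nat) (d : PySem.Dict (Char × Char) Nat), firstInv cs a d →
      (altPairLoop cs d (List.range' a k) = true ↔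
        ∃ j, a ≤ j ∧ j < a + k ∧ ∃ i, i + 2 ≤ j ∧ pairAt cs i = pairAt cs j) := by
  intro k
  induction k with
  | zero => intro a d _; simp [altPairLoop]; omega
  | succ k ih =>
    intro a d hinv
    rw [List.range'_succ]
    by_cases hc : ∃ v, d.get? (pairAt cs a) = some v
    · obtain ⟨v, hv⟩ := hc
      obtain ⟨hva, hvp, hvmin⟩ := (hinv _ _).mp hv
      by_cases hle : v + 2 ≤ a
      · -- success at index a
        constructor
        · intro _; exact ⟨a, le_refl a, by omega, v, hle, hvp⟩
        · intro _; simp [altPairLoop, hv, hle]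
      · -- overlapping previous occurrence: dict unchanged, recurse
        have hinv' : firstInv cs (a+1) d := by
          intro p w
          rw [hinv p w]
          constructor
          · rintro ⟨h1, h2, h3⟩; exact ⟨by omega, h2, h3⟩
          · rintro ⟨h1, h2, h3⟩
            refine ⟨?_, h2, h3⟩
            by_contra hwa
            have hwa' : w = a := by omega
            subst hwa'
            have := h3 v hva
            exact this (hvp.trans h2)
        have hrec := ih (a+1) d hinv'
        have hstep : altPairLoop cs d (a :: List.range' (a+1) k) =
            altPairLoop cs d (List.range' (a+1) k) := by
          simp [altPairLoop, hv, hle]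
        rw [hstep, hrec]
        constructor
        · rintro ⟨j, h1, h2, w, h3, h4⟩; exact ⟨j, by omega, by omega, w, h3, h4⟩
        · rintro ⟨j, h1, h2, w, h3, h4⟩
          refine ⟨j, ?_, by omega, w, h3, h4⟩
          -- j = a is impossible: the first occurrence v of pairAt cs a overlaps
          by_contra hja
          have hj : j = a := by omega
          subst hj
          have hwv : v ≤ w := by
            by_contra hlt
            exact hvmin w (by omega) h4
          omega
    · push Not at hc
      have hnone : d.get? (pairAt cs a) = none := by
        cases h : d.get? (pairAt cs a) with
        | none => rfl
        | some v => exact absurd h (hc v)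
      have hnoprev : ∀ u, u < a → pairAt cs u ≠ pairAt cs a := by
        intro u hu hpe
        classical
        have hP : ∃ m, m < a ∧ pairAt cs m = pairAt cs a := ⟨u, hu, hpe⟩
        obtain ⟨h1, h2⟩ := Nat.find_spec hP
        have : d.get? (pairAt cs a) = some (Nat.find hP) := by
          rw [hinv (pairAt cs a) (Nat.find hP)]
          exact ⟨h1, h2, fun w hw hcp =>
            Nat.find_min hP hw ⟨by omega, hcp⟩⟩
        rw [hnone] at this
        simp at this
      have hinv' : firstInv cs (a+1) (d.insert (pairAt cs a) a) := by
        intro p w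
        rw [PySem.Dict.get?_insert]
        split_ifs with hp
        · subst hp
          constructor
          · intro h
            have hw : w = a := by injection h; omega
            subst hw
            exact ⟨by omega, rfl, fun u hu => hnoprev u hu⟩
          · rintro ⟨h1, h2, h3⟩
            congr 1
            by_contra hwa
            have hw : w < a := by omega
            exact hnoprev w hw h2
        · rw [hinv p w]
          constructor
          · rintro ⟨h1, h2, h3⟩; exact ⟨by omega, h2, h3⟩
          · rintro ⟨h1, h2, h3⟩
            refine ⟨?_, h2, h3⟩
            by_contra hwa
            have hw : w = a := by omega
            subst hw
            exact hp h2.symm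
      have hstep : altPairLoop cs d (a :: List.range' (a+1) k) =
          altPairLoop cs (d.insert (pairAt cs a) a) (List.range' (a+1) k) := by
        simp [altPairLoop, hnone]
      rw [hstep, ih (a+1) _ hinv']
      constructor
      · rintro ⟨j, h1, h2, w, h3, h4⟩; exact ⟨j, by omega, by omega, w, h3, h4⟩
      · rintro ⟨j, h1, h2, w, h3, h4⟩
        refine ⟨j, ?_, by omega, w, h3, h4⟩
        by_contra hja
        have hj : j = a := by omega
        subst hj
        exact hnoprev w (by omega) h4

theorem aTripleLoop_spec (cs : List Char) (nm2 : Nat) :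
    ∀ (i : Nat) (count : Int), 0 ≤ count →
      (1 ≤ aTripleLoop cs nm2 i count ↔
        1 ≤ count ∨ ∃ j, i ≤ j ∧ j < nm2 ∧ cs.getD j ' ' = cs.getD (j+2) ' ') := by
  intro i count
  fun_induction aTripleLoop cs nm2 i count with
  | case1 i count h heq ih =>
    intro hc
    rw [ih (by omega)]
    constructor
    · intro _; exact Or.inr ⟨i, le_refl i, h, heq⟩
    · intro _; exact Or.inl (by omega)
  | case2 i count h hne ih =>
    intro hc
    rw [ih hc]
    constructor
    · rintro (h1 | ⟨j, h1, h2, h3⟩)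
      · exact Or.inl h1
      · exact Or.inr ⟨j, by omega, h2, h3⟩
    · rintro (h1 | ⟨j, h1, h2, h3⟩)
      · exact Or.inl h1
      · refine Or.inr ⟨j, ?_, h2, h3⟩
        rcases Nat.eq_or_lt_of_le h1 with h4 | h4
        · exact absurd (h4 ▸ h3) hne
        · omega
  | case3 i count h =>
    intro hc
    constructor
    · exact Or.inl
    · rintro (h1 | ⟨j, h1, h2, h3⟩)
      · exact h1
      · omega

-- each string's pair count in A is the sum over i of the matches counted by the inner loop
theorem aCount_spec (cs : List Char) (n : Nat) :
    (1 ≤ (List.range (n-1)).foldl (fun c i =>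
      (List.range' (i+2) (n-1-(i+2))).foldl
        (fun c2 j => if pairAt cs i = pairAt cs j then c2+1 else c2) c) (0:Int)) ↔
    ∃ i, i < n-1 ∧ ∃ j, i + 2 ≤ j ∧ j < n-1 ∧ pairAt cs i = pairAt cs j := by
  have hinner : ∀ (c : Int) (i : Nat),
      (List.range' (i+2) (n-1-(i+2))).foldl
        (fun c2 j => if pairAt cs i = pairAt cs j then c2+1 else c2) c =
      c + ((List.range' (i+2) (n-1-(i+2))).countP
        (fun j => decide (pairAt cs i = pairAt cs j)) : Int) := by
    intro c i
    exact PySem.List.foldl_ite_add_one _ _ _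
  have h1 : (List.range (n-1)).foldl (fun c i =>
      (List.range' (i+2) (n-1-(i+2))).foldl
        (fun c2 j => if pairAt cs i = pairAt cs j then c2+1 else c2) c) (0:Int)
      = 0 + ((List.range (n-1)).map (fun i =>
          (((List.range' (i+2) (n-1-(i+2))).countP
            (fun j => decide (pairAt cs i = pairAt cs j)) : Nat) : Int))).sum := by
    have hcg := PySem.List.foldl_congr_mem
      (l := List.range (n-1)) (init := (0:Int))
      (f := fun c i => (List.range' (i+2) (n-1-(i+2))).foldl
        (fun c2 j => if pairAt cs i = pairAt cs j then c2+1 else c2) c)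
      (g := fun c i => c + (((List.range' (i+2) (n-1-(i+2))).countP
        (fun j => decide (pairAt cs i = pairAt cs j)) : Nat) : Int))
      (fun acc x _ => hinner acc x)
    rw [hcg]
    exact PySem.List.foldl_add _ _ _
  rw [h1, zero_add]
  have h2 : ((List.range (n-1)).map (fun i =>
      (((List.range' (i+2) (n-1-(i+2))).countP
        (fun j => decide (pairAt cs i = pairAt cs j)) : Nat) : Int))).sum
      = (((List.range (n-1)).map (fun i =>
          ((List.range' (i+2) (n-1-(i+2))).countP
            (fun j => decide (pairAt cs i = pairAt cs j)) : Nat))).sum : Int) := by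
    rw [Nat.cast_list_sum, List.map_map]
    rfl
  rw [h2]
  rw [show (1:Int) ≤ (((List.range (n-1)).map (fun i =>
      ((List.range' (i+2) (n-1-(i+2))).countP
        (fun j => decide (pairAt cs i = pairAt cs j)) : Nat))).sum : Int) ↔
      1 ≤ ((List.range (n-1)).map (fun i =>
      ((List.range' (i+2) (n-1-(i+2))).countP
        (fun j => decide (pairAt cs i = pairAt cs j)) : Nat))).sum from by exact_mod_cast Iff.rfl]
  constructor
  · intro hs
    by_contra hno
    push Not at hno
    have hz : ((List.range (n-1)).map (fun i =>
        ((List.range' (i+2) (n-1-(i+2))).countP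
          (fun j => decide (pairAt cs i = pairAt cs j)) : Nat))).sum = 0 := by
      rw [List.sum_eq_zero_iff_forall_eq_nat]
      intro x hx
      obtain ⟨i, hi, hxe⟩ := List.mem_map.mp hx
      subst hxe
      rw [List.countP_eq_zero]
      intro j hj
      rw [List.mem_range'_1] at hj
      rw [List.mem_range] at hi
      simp only [decide_eq_true_eq]
      intro hpe
      exact absurd hpe (hno i hi j hj.1 (by omega))
    omega
  · rintro ⟨i, hi, j, hj1, hj2, hpe⟩
    have hcp : 0 < (List.range' (i+2) (n-1-(i+2))).countP
        (fun j => decide (pairAt cs i = pairAt cs j)) := by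
      rw [List.countP_pos_iff]
      exact ⟨j, List.mem_range'_1.mpr ⟨hj1, by omega⟩, by simpa using hpe⟩
    have hle := List.single_le_sum (l := (List.range (n-1)).map (fun i =>
        ((List.range' (i+2) (n-1-(i+2))).countP
          (fun j => decide (pairAt cs i = pairAt cs j)) : Nat)))
      (by intro x _; omega)
      ((List.range' (i+2) (n-1-(i+2))).countP
        (fun j => decide (pairAt cs i = pairAt cs j)))
      (List.mem_map.mpr ⟨i, List.mem_range.mpr hi, rfl⟩)
    omega

theorem nice_eq (s : String) : aNice s = altNice s := by
  unfold aNice altNice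
  simp only []
  set cs := s.toList with hcs
  set n := cs.length with hn
  have hpair : decide (1 ≤ (List.range (n-1)).foldl (fun c i =>
      (List.range' (i+2) (n-1-(i+2))).foldl
        (fun c2 j => if pairAt cs i = pairAt cs j then c2+1 else c2) c) (0:Int))
      = altPairLoop cs PySem.Dict.empty (List.range (n-1)) := by
    rw [Bool.eq_iff_iff, decide_eq_true_iff, aCount_spec]
    rw [List.range_eq_range', altPairLoop_spec cs (n-1) 0 _ (firstInv_empty cs)]
    constructor
    · rintro ⟨i, hi, j, h1, h2, h3⟩
      exact ⟨j, by omega, by omega, i, h1, h3⟩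
    · rintro ⟨j, h1, h2, i, h3, h4⟩
      exact ⟨i, by omega, j, h3, by omega, h4⟩
  have htrip : decide (1 ≤ aTripleLoop cs (n-2) 0 0)
      = (List.range (n-2)).any (fun i => cs.getD i ' ' == cs.getD (i+2) ' ') := by
    rw [Bool.eq_iff_iff, decide_eq_true_iff,
      aTripleLoop_spec cs (n-2) 0 0 (by omega), List.any_eq_true]
    constructor
    · rintro ((h : (1:Int) ≤ 0) | ⟨j, _, h2, h3⟩)
      · omega
      · exact ⟨j, List.mem_range.mpr h2, beq_iff_eq.mpr h3⟩
    · rintro ⟨j, hj, h⟩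
      exact Or.inr ⟨j, Nat.zero_le j, List.mem_range.mp hj, beq_iff_eq.mp h⟩
  rw [hpair, htrip]
  cases altPairLoop cs PySem.Dict.empty (List.range (n-1)) <;> simp

-- ===== VERDICT (by name: the statement is the Claim_ definition above) =====
theorem day5_solve2_spec : Claim_equal_day5_solve2 := by
  intro s_list _
  unfold Spec_day5_solve2 day5_solve2 day5_solve2_alt
  rw [PySem.List.foldl_append_if_eq_filter]
  rw [List.nil_append]
  rw [funext nice_eq]
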